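-- pv_equiv track=rewrite | github.com/blackiller35/BLE-Radar-Omega-Al-v33 | ble_radar/history/operator_outcome_learning.py | _compute_observed_outcome
-- ===== SOURCE A (Python) =====
-- from typing import Any, Dict, List, Optional, Set, Tuple
--
-- def _norm(value: Any) -> str:
--     return str(value or "").strip().lower()
--
-- def _compute_observed_outcome(outcome_rows: List[Dict[str, Any]], quality_level: str) -> str:
--     if not outcome_rows:
--         return "insufficient_history"
--
--     labels = {_norm(r.get("outcome_label")) for r in outcome_rows}
--     reopened = any(bool(r.get("reopened")) for r in outcome_rows)
--     if reopened or "resolved_but_returned" in labels: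
--         if "resolved_cleanly" in labels or "stabilized" in labels:
--             return "mixed_with_reopen"
--         return "reopened_after_action"
--     if "resolved_cleanly" in labels or "stabilized" in labels:
--         return "stabilized_after_action"
--     if quality_level in {"fragile", "likely_to_reopen"}:
--         return "fragile_followup_only"
--     return "mixed_signals"
-- ===== SOURCE B (Python) =====
-- from typing import Any, Dict, List
--
-- def _norm(value: Any) -> str:
--     return str(value or "").strip().lower()
--
-- # outcome table indexed by a 3-bit evidence mask:
-- # bit 0 = some row reopened, bit 1 = some label 'resolved_but_returned',
-- # bit 2 = some label 'resolved_cleanly'/'stabilized'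
-- _MASK_OUTCOME = {
--     1: "reopened_after_action",
--     2: "reopened_after_action",
--     3: "reopened_after_action",
--     4: "stabilized_after_action",
--     5: "mixed_with_reopen",
--     6: "mixed_with_reopen",
--     7: "mixed_with_reopen",
-- }
--
-- _LABEL_BIT = {"resolved_but_returned": 2, "resolved_cleanly": 4, "stabilized": 4}
--
-- def _row_mask(r: Dict[str, Any]) -> int:
--     return (1 if r.get("reopened") else 0) | _LABEL_BIT.get(_norm(r.get("outcome_label")), 0)
--
-- def _compute_observed_outcome(outcome_rows: List[Dict[str, Any]], quality_level: str) -> str: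
--     if not outcome_rows:
--         return "insufficient_history"
--     mask = 0
--     for r in outcome_rows:
--         mask |= _row_mask(r)
--         if mask & 3 and mask & 4:
--             break  # outcome can no longer change
--     if mask:
--         return _MASK_OUTCOME[mask]
--     return "fragile_followup_only" if quality_level in ("fragile", "likely_to_reopen") else "mixed_signals"
-- ===== Notes on version B (the rewrite author's own statement) =====
-- stated objective: alternative
-- what changed: Replaces the label-set comprehension, the separate any() pass and the four-way conditional cascade by an arithmetical formulation: each row is folded into a 3-bit evidence mask with an early exit once the outcome is fixed, and the result is read from a precomputed mask-to-outcome table.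
import Mathlib
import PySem

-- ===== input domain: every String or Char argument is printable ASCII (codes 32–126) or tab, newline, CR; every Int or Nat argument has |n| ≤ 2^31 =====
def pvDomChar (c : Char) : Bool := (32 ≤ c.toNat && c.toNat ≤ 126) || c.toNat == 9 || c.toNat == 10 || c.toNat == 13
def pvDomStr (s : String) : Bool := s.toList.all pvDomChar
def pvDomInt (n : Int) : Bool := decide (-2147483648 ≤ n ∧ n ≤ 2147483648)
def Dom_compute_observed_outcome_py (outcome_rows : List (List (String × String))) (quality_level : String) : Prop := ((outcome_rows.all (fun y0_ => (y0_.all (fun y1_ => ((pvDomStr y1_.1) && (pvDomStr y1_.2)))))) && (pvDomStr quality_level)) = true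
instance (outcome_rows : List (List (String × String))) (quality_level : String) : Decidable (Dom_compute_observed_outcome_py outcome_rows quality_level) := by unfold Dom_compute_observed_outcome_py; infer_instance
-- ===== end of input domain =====

-- B replaces A's set comprehension, any() pass and conditional cascade by an arithmetical
-- formulation: each row is folded into a 3-bit evidence mask (with early exit once the
-- outcome is fixed) and the answer is read from an 8-entry mask->outcome table.
-- (objective: alternative algorithmic formulation, same O(n) cost)

-- ===== PORT A =====
-- _norm(value): str(value or "").strip().lower() on an Option String value
def pyNorm (v : Option String) : String :=
  PySem.Str.lower (PySem.Str.strip (match v with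
    | none => ""
    | some s => if s = "" then "" else s))

-- bool(v) for an Option String value (truthiness of r.get(...))
def pyTruthy (v : Option String) : Bool :=
  match v with
  | none => false
  | some s => s ≠ ""

def compute_observed_outcome_py (outcome_rows : List (List (String × String))) (quality_level : String) : String :=
  if outcome_rows = [] then "insufficient_history"
  else
    let labels : PySem.Set String :=
      PySem.Set.ofList (outcome_rows.map (fun r => pyNorm ((PySem.Dict.mk r).get? "outcome_label")))
    let reopened := outcome_rows.any (fun r => pyTruthy ((PySem.Dict.mk r).get? "reopened"))
    if reopened || PySem.Set.contains labels "resolved_but_returned" then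
      if PySem.Set.contains labels "resolved_cleanly" || PySem.Set.contains labels "stabilized" then
        "mixed_with_reopen"
      else
        "reopened_after_action"
    else if PySem.Set.contains labels "resolved_cleanly" || PySem.Set.contains labels "stabilized" then
      "stabilized_after_action"
    else if quality_level = "fragile" || quality_level = "likely_to_reopen" then
      "fragile_followup_only"
    else
      "mixed_signals"

-- ===== PORT B =====
-- _MASK_OUTCOME: the 3-bit mask -> outcome table of Source B
def maskOutcome : PySem.Dict Nat String :=
  PySem.Dict.mk [(1, "reopened_after_action"), (2, "reopened_after_action"),
                 (3, "reopened_after_action"), (4, "stabilized_after_action"),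
                 (5, "mixed_with_reopen"), (6, "mixed_with_reopen"), (7, "mixed_with_reopen")]

-- _LABEL_BIT.get(label, 0)
def labelBit (label : String) : Nat :=
  PySem.Dict.getD (PySem.Dict.mk [("resolved_but_returned", 2), ("resolved_cleanly", 4), ("stabilized", 4)]) label 0

-- _row_mask(r)
def rowMask (r : List (String × String)) : Nat :=
  (if pyTruthy ((PySem.Dict.mk r).get? "reopened") then 1 else 0) |||
    labelBit (pyNorm ((PySem.Dict.mk r).get? "outcome_label"))

-- Source B's loop: mask |= _row_mask(r); break once mask & 3 and mask & 4 (outcome is fixed)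
def maskLoop (m : Nat) : List (List (String × String)) → Nat
  | [] => m
  | r :: rs =>
    let m' := m ||| rowMask r
    if m' &&& 3 ≠ 0 ∧ m' &&& 4 ≠ 0 then m' else maskLoop m' rs

def compute_observed_outcome_py_alt (outcome_rows : List (List (String × String))) (quality_level : String) : String :=
  if outcome_rows = [] then "insufficient_history"
  else
    let mask := maskLoop 0 outcome_rows
    if mask ≠ 0 then
      -- Python's _MASK_OUTCOME[mask]; a nonzero mask is always a key (1..7), so the
      -- KeyError default "" is unreachable
      PySem.Dict.getD maskOutcome mask ""
    else if quality_level = "fragile" || quality_level = "likely_to_reopen" then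
      "fragile_followup_only"
    else
      "mixed_signals"

-- ===== PRECONDITION & SPEC =====
def Spec_compute_observed_outcome_py (outcome_rows : List (List (String × String))) (quality_level : String) (out : String) : Prop := out = compute_observed_outcome_py_alt outcome_rows quality_level
instance (outcome_rows : List (List (String × String))) (quality_level : String) (out : String) : Decidable (Spec_compute_observed_outcome_py outcome_rows quality_level out) := by unfold Spec_compute_observed_outcome_py; infer_instance

-- ===== CLAIM (what is proved, stated in full; the proofs are below) =====
def Claim_equal_compute_observed_outcome_py : Prop := ∀ (outcome_rows : List (List (String × String))) (quality_level : String), Dom_compute_observed_outcome_py outcome_rows quality_level → Spec_compute_observed_outcome_py outcome_rows quality_level (compute_observed_outcome_py outcome_rows quality_level)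

-- ===== LEMMAS AND PROOFS =====
def normOf (r : List (String × String)) : String := pyNorm ((PySem.Dict.mk r).get? "outcome_label")
def fReopen (r : List (String × String)) : Bool := pyTruthy ((PySem.Dict.mk r).get? "reopened")
def fReturned (r : List (String × String)) : Bool := normOf r == "resolved_but_returned"
def fClean (r : List (String × String)) : Bool := (normOf r == "resolved_cleanly") || (normOf r == "stabilized")
def fBad (r : List (String × String)) : Bool := fReopen r || fReturned r

theorem labelBit_eq (l : String) :
    labelBit l = if l = "resolved_but_returned" then 2 else if l = "resolved_cleanly" then 4
      else if l = "stabilized" then 4 else 0 := by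
  unfold labelBit
  split_ifs with h1 h2 h3
  · subst h1; decide
  · subst h2; decide
  · subst h3; decide
  · have e1 : ("resolved_but_returned" == l) = false := by
      simp only [beq_eq_false_iff_ne, ne_eq]; exact fun h => h1 h.symm
    have e2 : ("resolved_cleanly" == l) = false := by
      simp only [beq_eq_false_iff_ne, ne_eq]; exact fun h => h2 h.symm
    have e3 : ("stabilized" == l) = false := by
      simp only [beq_eq_false_iff_ne, ne_eq]; exact fun h => h3 h.symm
    simp [PySem.Dict.getD, PySem.Dict.get?, List.find?, e1, e2, e3]

theorem rowMask_facts (r : List (String × String)) :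
    rowMask r < 8 ∧ ((rowMask r &&& 3 ≠ 0) ↔ fBad r = true) ∧ ((rowMask r &&& 4 ≠ 0) ↔ fClean r = true) := by
  unfold rowMask fBad fReopen fReturned fClean
  have hlb : labelBit (pyNorm ((PySem.Dict.mk r).get? "outcome_label")) = labelBit (normOf r) := rfl
  rw [hlb, labelBit_eq]
  cases hb : pyTruthy ((PySem.Dict.mk r).get? "reopened") <;>
  · by_cases h1 : normOf r = "resolved_but_returned"
    · simp [h1]
    · by_cases h2 : normOf r = "resolved_cleanly"
      · simp [h1, h2]
      · by_cases h3 : normOf r = "stabilized"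
        · simp [h1, h2, h3]
        · simp [h1, h2, h3]

theorem or_eq_zero_iff' (a b : Nat) : a ||| b = 0 ↔ a = 0 ∧ b = 0 := by
  constructor
  · intro h
    have h' : ∀ i, (a ||| b).testBit i = Nat.testBit 0 i := fun i => by rw [h]
    constructor <;> apply Nat.eq_of_testBit_eq <;> intro i <;>
      · have := h' i
        simp only [Nat.testBit_lor, Nat.zero_testBit, Bool.or_eq_false_iff] at this
        simp [this.1, this.2, Nat.zero_testBit]
  · rintro ⟨rfl, rfl⟩; rfl

theorem and_or_3 (a b : Nat) : ((a ||| b) &&& 3 ≠ 0) ↔ (a &&& 3 ≠ 0 ∨ b &&& 3 ≠ 0) := by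
  rw [Nat.and_or_distrib_right, ne_eq, or_eq_zero_iff']
  tauto

theorem and_or_4 (a b : Nat) : ((a ||| b) &&& 4 ≠ 0) ↔ (a &&& 4 ≠ 0 ∨ b &&& 4 ≠ 0) := by
  rw [Nat.and_or_distrib_right, ne_eq, or_eq_zero_iff']
  tauto

theorem maskLoop_spec (rows : List (List (String × String))) : ∀ (m : Nat), m < 8 →
    maskLoop m rows < 8 ∧
    ((maskLoop m rows &&& 3 ≠ 0) ↔ (m &&& 3 ≠ 0 ∨ rows.any fBad = true)) ∧
    ((maskLoop m rows &&& 4 ≠ 0) ↔ (m &&& 4 ≠ 0 ∨ rows.any fClean = true)) := by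
  induction rows with
  | nil => intro m hm; simp [maskLoop, hm]
  | cons r rs ih =>
    intro m hm
    obtain ⟨hlt, h3, h4⟩ := rowMask_facts r
    have hm' : m ||| rowMask r < 8 := Nat.or_lt_two_pow (n := 3) hm hlt
    simp only [maskLoop]
    split_ifs with he
    · refine ⟨hm', ?_, ?_⟩
      · rw [and_or_3] at he ⊢
        constructor
        · rintro (h | h); exact Or.inl h; exact Or.inr (by simp [List.any_cons, h3.mp h])
        · intro _; exact he.1
      · rw [and_or_4] at he ⊢
        constructor
        · rintro (h | h); exact Or.inl h; exact Or.inr (by simp [List.any_cons, h4.mp h])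
        · intro _; exact he.2
    · obtain ⟨ha, hb, hc⟩ := ih (m ||| rowMask r) hm'
      refine ⟨ha, ?_, ?_⟩
      · rw [hb, and_or_3, h3, List.any_cons]
        constructor
        · rintro ((h | h) | h) <;> simp [h]
        · intro h
          rcases h with h | h
          · exact Or.inl (Or.inl h)
          · rcases Bool.or_eq_true_iff.mp h with h | h
            · exact Or.inl (Or.inr (by simp [h]))
            · exact Or.inr h
      · rw [hc, and_or_4, h4, List.any_cons]
        constructor
        · rintro ((h | h) | h) <;> simp [h]
        · intro h
          rcases h with h | h
          · exact Or.inl (Or.inl h)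
          · rcases Bool.or_eq_true_iff.mp h with h | h
            · exact Or.inl (Or.inr (by simp [h]))
            · exact Or.inr h

theorem contains_ofList_map (rows : List (List (String × String))) (x : String) :
    PySem.Set.contains (PySem.Set.ofList (rows.map normOf)) x = rows.any (fun r => normOf r == x) := by
  rcases h : rows.any (fun r => normOf r == x) with _ | _
  · simp only [List.any_eq_false] at h
    simp only [PySem.Set.contains, List.contains_eq_mem, decide_eq_false_iff_not,
      PySem.Set.mem_ofList, List.mem_map]
    rintro ⟨r, hr, hx⟩
    have hb := h r hr
    simp [hx] at hb
  · simp only [List.any_eq_true] at h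
    rcases h with ⟨r, hr, hx⟩
    have hxe : normOf r = x := by simpa using hx
    simp only [PySem.Set.contains, List.contains_eq_mem, decide_eq_true_eq,
      PySem.Set.mem_ofList, List.mem_map]
    exact ⟨r, hr, hxe⟩

theorem any_or_distrib (rows : List (List (String × String))) (p q : List (String × String) → Bool) :
    rows.any (fun r => p r || q r) = (rows.any p || rows.any q) := by
  induction rows with
  | nil => simp
  | cons r rest ih =>
    simp only [List.any_cons, ih]
    cases p r <;> cases q r <;> simp

-- ===== VERDICT (by name: the statement is the Claim_ definition above) =====
theorem compute_observed_outcome_py_spec : Claim_equal_compute_observed_outcome_py := by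
  intro rows q _
  unfold Spec_compute_observed_outcome_py compute_observed_outcome_py compute_observed_outcome_py_alt
  by_cases hnil : rows = []
  · simp [hnil]
  · simp only [if_neg hnil]
    obtain ⟨hL, h3, h4⟩ := maskLoop_spec rows 0 (by decide)
    simp only [Nat.zero_and, ne_eq, not_true_eq_false, false_or] at h3 h4
    set L := maskLoop 0 rows with hLdef
    clear hLdef
    have hmap : rows.map (fun r => pyNorm ((PySem.Dict.mk r).get? "outcome_label")) = rows.map normOf := rfl
    rw [hmap, contains_ofList_map, contains_ofList_map, contains_ofList_map]
    have hre : rows.any (fun r => pyTruthy ((PySem.Dict.mk r).get? "reopened")) = rows.any fReopen := rfl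
    have hbad : (rows.any fReopen || rows.any (fun r => normOf r == "resolved_but_returned")) = rows.any fBad := by
      rw [← any_or_distrib]; rfl
    have hcl : (rows.any (fun r => normOf r == "resolved_cleanly") ||
        rows.any (fun r => normOf r == "stabilized")) = rows.any fClean := by
      rw [← any_or_distrib]; rfl
    rw [hre, hbad, hcl]
    rcases hb : rows.any fBad with _ | _ <;> rcases hc : rows.any fClean with _ | _ <;>
      rw [hb] at h3 <;> rw [hc] at h4 <;> simp at h3 h4
    · -- no bad, no clean: L = 0, quality fallback on both sides
      interval_cases L <;> simp_all
    · -- clean only: L = 4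
      interval_cases L <;> simp_all [maskOutcome, PySem.Dict.getD, PySem.Dict.get?, List.find?]
    · -- bad only: L in {1,2,3}
      interval_cases L <;> simp_all [maskOutcome, PySem.Dict.getD, PySem.Dict.get?, List.find?]
    · -- both: L in {5,6,7}
      interval_cases L <;> simp_all [maskOutcome, PySem.Dict.getD, PySem.Dict.get?, List.find?]
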